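-- pv_equiv track=rewrite | github.com/julianapetrelli/data-structure-activity | exercise_4/for/main.py | estados_regiao_for
-- ===== SOURCE A (Python) =====
-- def estados_regiao_for(regiao):
--     estados = {
--         'Norte': ['Acre', 'Amapá', 'Amazonas', 'Pará', 'Rondônia', 'Roraima', 'Tocantins'],
--         'Nordeste': ['Alagoas', 'Bahia', 'Ceará', 'Maranhão', 'Paraíba', 'Pernambuco', 'Piauí', 'Rio Grande do Norte', 'Sergipe'],
--         'Centro-Oeste': ['Distrito Federal', 'Goiás', 'Mato Grosso', 'Mato Grosso do Sul'],
--         'Sudeste': ['Espírito Santo', 'Minas Gerais', 'Rio de Janeiro', 'São Paulo'],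
--         'Sul': ['Paraná', 'Rio Grande do Sul', 'Santa Catarina']
--     }
--
--     lista = []
--     for estado in estados:
--         if estado == regiao:
--             lista = estados[estado]
--     return lista
-- ===== SOURCE B (Python) =====
-- # B inverts the data structure: instead of a region -> states dict scanned key
-- # by key, it keeps a flat state -> region table and collects the matching
-- # states in one comprehension pass.
-- _ESTADO_REGIAO = [
--     ('Acre', 'Norte'), ('Amapá', 'Norte'), ('Amazonas', 'Norte'),
--     ('Pará', 'Norte'), ('Rondônia', 'Norte'), ('Roraima', 'Norte'),
--     ('Tocantins', 'Norte'),
--     ('Alagoas', 'Nordeste'), ('Bahia', 'Nordeste'), ('Ceará', 'Nordeste'),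
--     ('Maranhão', 'Nordeste'), ('Paraíba', 'Nordeste'),
--     ('Pernambuco', 'Nordeste'), ('Piauí', 'Nordeste'),
--     ('Rio Grande do Norte', 'Nordeste'), ('Sergipe', 'Nordeste'),
--     ('Distrito Federal', 'Centro-Oeste'), ('Goiás', 'Centro-Oeste'),
--     ('Mato Grosso', 'Centro-Oeste'), ('Mato Grosso do Sul', 'Centro-Oeste'),
--     ('Espírito Santo', 'Sudeste'), ('Minas Gerais', 'Sudeste'),
--     ('Rio de Janeiro', 'Sudeste'), ('São Paulo', 'Sudeste'),
--     ('Paraná', 'Sul'), ('Rio Grande do Sul', 'Sul'),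
--     ('Santa Catarina', 'Sul'),
-- ]
--
-- def estados_regiao_for(regiao):
--     return [estado for estado, reg in _ESTADO_REGIAO if reg == regiao]
-- ===== Notes on version B (the rewrite author's own statement) =====
-- stated objective: alternative
-- what changed: B inverts the data structure: instead of a region->list-of-states dict scanned key by key with an accumulator, it keeps a flat state->region pair table and builds the result with a single filtering comprehension over the 27 states.
import Mathlib
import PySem

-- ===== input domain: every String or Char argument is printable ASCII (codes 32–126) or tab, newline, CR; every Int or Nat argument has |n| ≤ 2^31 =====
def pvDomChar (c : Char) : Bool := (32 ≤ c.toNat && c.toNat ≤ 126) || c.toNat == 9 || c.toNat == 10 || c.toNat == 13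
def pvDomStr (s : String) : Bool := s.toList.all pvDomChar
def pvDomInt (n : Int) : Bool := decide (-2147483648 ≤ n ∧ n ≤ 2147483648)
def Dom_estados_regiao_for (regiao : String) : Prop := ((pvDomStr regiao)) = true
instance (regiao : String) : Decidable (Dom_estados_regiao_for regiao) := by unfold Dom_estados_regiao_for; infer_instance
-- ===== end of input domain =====

-- B inverts the data structure: a flat state->region pair table filtered in one pass,
-- instead of A's region->states dict scanned key by key (alternative decomposition).


-- ===== PORT A =====
def estados_regiao_for (regiao : String) : List String :=
  let estados : PySem.Dict String (List String) := PySem.Dict.ofList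
    [("Norte", ["Acre", "Amapá", "Amazonas", "Pará", "Rondônia", "Roraima", "Tocantins"]),
     ("Nordeste", ["Alagoas", "Bahia", "Ceará", "Maranhão", "Paraíba", "Pernambuco", "Piauí", "Rio Grande do Norte", "Sergipe"]),
     ("Centro-Oeste", ["Distrito Federal", "Goiás", "Mato Grosso", "Mato Grosso do Sul"]),
     ("Sudeste", ["Espírito Santo", "Minas Gerais", "Rio de Janeiro", "São Paulo"]),
     ("Sul", ["Paraná", "Rio Grande do Sul", "Santa Catarina"])]
  -- for estado in estados: if estado == regiao: lista = estados[estado]  (key present, so getD never defaults)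
  estados.keys.foldl
    (fun lista estado => if estado == regiao then estados.getD estado [] else lista) []

-- ===== PORT B =====
def pvEstadoRegiao : List (String × String) :=
  [("Acre", "Norte"), ("Amapá", "Norte"), ("Amazonas", "Norte"),
   ("Pará", "Norte"), ("Rondônia", "Norte"), ("Roraima", "Norte"),
   ("Tocantins", "Norte"),
   ("Alagoas", "Nordeste"), ("Bahia", "Nordeste"), ("Ceará", "Nordeste"),
   ("Maranhão", "Nordeste"), ("Paraíba", "Nordeste"),
   ("Pernambuco", "Nordeste"), ("Piauí", "Nordeste"),
   ("Rio Grande do Norte", "Nordeste"), ("Sergipe", "Nordeste"),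
   ("Distrito Federal", "Centro-Oeste"), ("Goiás", "Centro-Oeste"),
   ("Mato Grosso", "Centro-Oeste"), ("Mato Grosso do Sul", "Centro-Oeste"),
   ("Espírito Santo", "Sudeste"), ("Minas Gerais", "Sudeste"),
   ("Rio de Janeiro", "Sudeste"), ("São Paulo", "Sudeste"),
   ("Paraná", "Sul"), ("Rio Grande do Sul", "Sul"),
   ("Santa Catarina", "Sul")]

def estados_regiao_for_alt (regiao : String) : List String :=
  (pvEstadoRegiao.filter (fun p => p.2 == regiao)).map Prod.fst

-- ===== PRECONDITION & SPEC =====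
def Spec_estados_regiao_for (regiao : String) (out : List String) : Prop := out = estados_regiao_for_alt regiao
instance (regiao : String) (out : List String) : Decidable (Spec_estados_regiao_for regiao out) := by unfold Spec_estados_regiao_for; infer_instance

-- ===== CLAIM (what is proved, stated in full; the proofs are below) =====
def Claim_equal_estados_regiao_for : Prop := ∀ (regiao : String), Dom_estados_regiao_for regiao → Spec_estados_regiao_for regiao (estados_regiao_for regiao)

-- ===== LEMMAS AND PROOFS =====

-- ===== VERDICT (by name: the statement is the Claim_ definition above) =====
theorem estados_regiao_for_spec : Claim_equal_estados_regiao_for := by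
  intro regiao _
  unfold Spec_estados_regiao_for estados_regiao_for estados_regiao_for_alt pvEstadoRegiao
  by_cases h1 : regiao = "Norte"
  · subst h1; rfl
  by_cases h2 : regiao = "Nordeste"
  · subst h2; rfl
  by_cases h3 : regiao = "Centro-Oeste"
  · subst h3; rfl
  by_cases h4 : regiao = "Sudeste"
  · subst h4; rfl
  by_cases h5 : regiao = "Sul"
  · subst h5; rfl
  simp [PySem.Dict.ofList, PySem.Dict.update, PySem.Dict.insert, PySem.Dict.contains,
        PySem.Dict.empty, PySem.Dict.keys, PySem.Dict.getD, PySem.Dict.get?,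
        List.foldl, List.filter, beq_eq_false_iff_ne.mpr (Ne.symm h1),
        beq_eq_false_iff_ne.mpr (Ne.symm h2), beq_eq_false_iff_ne.mpr (Ne.symm h3),
        beq_eq_false_iff_ne.mpr (Ne.symm h4), beq_eq_false_iff_ne.mpr (Ne.symm h5),
        Ne.symm h1, Ne.symm h2, Ne.symm h3, Ne.symm h4, Ne.symm h5]
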